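-- pv_equiv track=rewrite | github.com/AaronJimenezGarcia/Compression-Decompression-Exercises | Kraft-McMillan.py | concatenarDigitos
-- ===== SOURCE A (Python) =====
-- def concatenarDigitos(veces, lista, q):
--     listaAuxiliar = []
--     listaActualizada = lista
--     for i in range(veces):
--         for j in listaActualizada:
--             for k in range(q):
--                 digito = list(j)
--                 digito.append(k)
--                 listaAuxiliar.append(digito)
--         listaActualizada = listaAuxiliar
--         listaAuxiliar = []
--     return listaActualizada
-- ===== SOURCE B (Python) =====
-- from itertools import product
--
--
-- def concatenarDigitos(veces, lista, q):
--     if veces <= 0 or not lista: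
--         return lista
--     sufs = [list(s) for s in product(range(q), repeat=veces)]
--     return [j + s for j in lista for s in sufs]
-- ===== Notes on version B (the rewrite author's own statement) =====
-- stated objective: idiomatic
-- what changed: Replaces A's veces-round rebuild loop (each round re-scans the whole intermediate list and appends one digit) by generating all length-veces digit suffixes once via itertools.product and emitting j+suffix in a single comprehension.
import Mathlib
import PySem

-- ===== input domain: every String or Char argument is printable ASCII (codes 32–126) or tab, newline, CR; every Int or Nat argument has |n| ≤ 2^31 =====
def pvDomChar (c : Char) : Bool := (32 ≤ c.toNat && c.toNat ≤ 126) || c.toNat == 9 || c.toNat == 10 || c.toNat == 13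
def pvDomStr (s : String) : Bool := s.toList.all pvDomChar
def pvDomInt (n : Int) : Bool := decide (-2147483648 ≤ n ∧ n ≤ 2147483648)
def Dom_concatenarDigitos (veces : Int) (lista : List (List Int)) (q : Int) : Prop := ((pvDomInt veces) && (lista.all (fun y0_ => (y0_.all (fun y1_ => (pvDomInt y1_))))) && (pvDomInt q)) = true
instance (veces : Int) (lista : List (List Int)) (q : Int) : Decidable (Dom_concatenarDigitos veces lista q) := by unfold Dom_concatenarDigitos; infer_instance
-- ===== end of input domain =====

-- B replaces A's veces-round rebuild loop by generating all digit suffixes once (itertools.product) and one comprehension — idiomatic, same cost.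


-- ===== PORT A =====
-- literal transliteration of A: veces rounds; each round appends every digit k<q to every list in the current list
def concatenarDigitos (veces : Int) (lista : List (List Int)) (q : Int) : List (List Int) :=
  (PySem.List.pyRange 0 veces 1).foldl
    (fun listaActualizada _i =>
      listaActualizada.foldl
        (fun listaAuxiliar j =>
          (PySem.List.pyRange 0 q 1).foldl
            (fun aux k => aux ++ [j ++ [k]]) listaAuxiliar)
        [])
    lista

-- ===== PORT B =====
-- itertools.product(range(q), repeat=n): all length-n digit tuples, last position varying fastest
def pvProdRepeat (q : Int) : Nat → List (List Int)
  | 0 => [[]]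
  | n + 1 =>
      -- empty pool short-circuit: product over range(q) with q <= 0 is empty at once (Python's product is lazy)
      if q ≤ 0 then []
      else (pvProdRepeat q n).flatMap (fun s => (PySem.List.pyRange 0 q 1).map (fun k => s ++ [k]))

-- port of B: guard veces <= 0 / empty lista, then one comprehension over lista x suffixes
def concatenarDigitos_alt (veces : Int) (lista : List (List Int)) (q : Int) : List (List Int) :=
  if veces ≤ 0 ∨ lista = [] then lista
  else lista.flatMap (fun j => (pvProdRepeat q veces.toNat).map (fun s => j ++ s))

-- ===== PRECONDITION & SPEC =====
def Spec_concatenarDigitos (veces : Int) (lista : List (List Int)) (q : Int) (out : List (List Int)) : Prop := out = concatenarDigitos_alt veces lista q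
instance (veces : Int) (lista : List (List Int)) (q : Int) (out : List (List Int)) : Decidable (Spec_concatenarDigitos veces lista q out) := by unfold Spec_concatenarDigitos; infer_instance

-- ===== CLAIM (what is proved, stated in full; the proofs are below) =====
def Claim_equal_concatenarDigitos : Prop := ∀ (veces : Int) (lista : List (List Int)) (q : Int), Dom_concatenarDigitos veces lista q → Spec_concatenarDigitos veces lista q (concatenarDigitos veces lista q)

-- ===== LEMMAS AND PROOFS =====

def pvStep (q : Int) (l : List (List Int)) : List (List Int) :=
  l.flatMap (fun j => (PySem.List.pyRange 0 q 1).map (fun k => j ++ [k]))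

theorem pvStep_eq (q : Int) (l : List (List Int)) (acc : List (List Int)) :
    l.foldl
      (fun listaAuxiliar j =>
        (PySem.List.pyRange 0 q 1).foldl (fun aux k => aux ++ [j ++ [k]]) listaAuxiliar)
      acc = acc ++ pvStep q l := by
  induction l generalizing acc with
  | nil => simp [pvStep]
  | cons x xs ih =>
      rw [List.foldl_cons, PySem.List.foldl_append_singleton_eq_map (f := fun k => x ++ [k]), ih]
      simp [pvStep]

theorem pvOuter (q : Int) (rng : List Int) (init : List (List Int)) :
    rng.foldl
      (fun listaActualizada _i =>
        listaActualizada.foldl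
          (fun listaAuxiliar j =>
            (PySem.List.pyRange 0 q 1).foldl (fun aux k => aux ++ [j ++ [k]]) listaAuxiliar)
          [])
      init = (pvStep q)^[rng.length] init := by
  induction rng generalizing init with
  | nil => rfl
  | cons x xs ih =>
      rw [List.foldl_cons, pvStep_eq, List.nil_append, ih, List.length_cons,
        Function.iterate_succ_apply]

theorem pvIter_step (q : Int) (n : Nat) (lista : List (List Int)) :
    (pvStep q)^[n] lista = lista.flatMap (fun j => (pvProdRepeat q n).map (fun s => j ++ s)) := by
  induction n with
  | zero => simp [pvProdRepeat]
  | succ n ih =>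
      rw [Function.iterate_succ_apply', ih]
      by_cases hq : q ≤ 0
      · rw [show pvProdRepeat q (n + 1) = [] from by simp [pvProdRepeat, hq]]
        have hnil : ∀ (l : List (List Int)), l.flatMap (fun _ => ([] : List (List Int))) = [] := by
          intro l; induction l <;> simp_all
        simp [pvStep, PySem.List.pyRange_one_eq_nil hq, hnil]
      · rw [show pvProdRepeat q (n + 1)
              = (pvProdRepeat q n).flatMap
                  (fun s => (PySem.List.pyRange 0 q 1).map (fun k => s ++ [k])) from by
            simp [pvProdRepeat, hq]]
        simp [pvStep, List.flatMap_assoc, List.map_flatMap, List.flatMap_map,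
          Function.comp_def, List.append_assoc]

-- ===== VERDICT (by name: the statement is the Claim_ definition above) =====
theorem concatenarDigitos_spec : Claim_equal_concatenarDigitos := by
  intro veces lista q _
  unfold Spec_concatenarDigitos concatenarDigitos concatenarDigitos_alt
  rw [pvOuter, PySem.List.length_pyRange_one, pvIter_step]
  by_cases hv : veces ≤ 0
  · have h0 : veces.toNat = 0 := by omega
    simp [hv, h0, pvProdRepeat]
  · by_cases hl : lista = []
    · simp [hl]
    · simp [hv, hl]
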